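-- pv_equiv track=rewrite | github.com/USonixGroup/wpt-cavitation | wavelet_transform/wpt/transform.py | calc_max_level
-- ===== SOURCE A (Python) =====
-- def calc_max_level(data, filter_len=None):
--     "Get the maximum decomposition level for a 1-dimensional array of data"
--
--     # Check that there are fewer nodes at max level than data points
--     if filter_len is None:
--         max_level = 0
--         sections = 1
--         while sections < len(data):
--             max_level += 1
--             sections *= 2
--         return max_level
--     # Check that max level node oontains more coeffs than filter
--     else:
--         max_level = 0
--         len_ = len(data)
--         while len_ > filter_len:
--             len_ = int(len_ / 2)
--             max_level += 1
--         return max_level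
-- ===== SOURCE B (Python) =====
-- def calc_max_level(data, filter_len=None):
--     "Get the maximum decomposition level for a 1-dimensional array of data"
--     n = len(data)
--     if filter_len is None:
--         # smallest L with 2**L >= n, i.e. ceil(log2(n)) (0 for n <= 1)
--         return 0 if n <= 1 else (n - 1).bit_length()
--     if n <= filter_len:
--         return 0
--     # smallest k with n >> k <= filter_len; it is within 1 of the bit-length gap
--     k = n.bit_length() - filter_len.bit_length()
--     return k if (n >> k) <= filter_len else k + 1
-- ===== Notes on version B (the rewrite author's own statement) =====
-- stated objective: idiomatic
-- what changed: Replaces both halving/doubling loops with closed forms from bit_length: ceil(log2 n) for the None branch, and a bit-length gap plus one boundary comparison for the filter_len branch.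
import Mathlib
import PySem

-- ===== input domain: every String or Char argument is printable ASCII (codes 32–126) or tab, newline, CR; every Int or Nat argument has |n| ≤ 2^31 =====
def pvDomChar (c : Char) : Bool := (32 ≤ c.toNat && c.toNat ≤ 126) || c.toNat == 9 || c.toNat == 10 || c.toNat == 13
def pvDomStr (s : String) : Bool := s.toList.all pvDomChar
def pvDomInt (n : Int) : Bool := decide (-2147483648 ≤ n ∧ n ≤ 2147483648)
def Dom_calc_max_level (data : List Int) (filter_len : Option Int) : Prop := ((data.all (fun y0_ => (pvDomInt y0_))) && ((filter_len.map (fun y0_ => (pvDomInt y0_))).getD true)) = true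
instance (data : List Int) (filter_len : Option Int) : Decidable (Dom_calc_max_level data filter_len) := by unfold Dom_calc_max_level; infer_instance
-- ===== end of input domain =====

-- B replaces A's two halving/doubling loops by bit-length closed forms (idiomatic; same measured cost).

-- ===== PORT A =====
-- `while sections < len(data): max_level += 1; sections *= 2`; the loop runs at most
-- `len(data)` times (sections doubles from 1), so fuel `len(data) + 1` is always enough.
def aLoopNone : Nat → Nat → Nat → Int → Int
  | 0, _, _, level => level
  | fuel + 1, n, sections, level =>
    if sections < n then aLoopNone fuel n (sections * 2) (level + 1) else level

-- `while len_ > filter_len: len_ = int(len_ / 2); max_level += 1`.  `int(len_ / 2)`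
-- truncates toward zero, exact for |len_| < 2^53 (list lengths): ported as Int.tdiv.
-- The loop runs at most `len(data) + 1` times when filter_len ≥ 0 (Pre_), so that fuel suffices.
def aLoopSome : Nat → Int → Int → Int → Int
  | 0, _, _, level => level
  | fuel + 1, len_, fl, level =>
    if len_ > fl then aLoopSome fuel (len_.tdiv 2) fl (level + 1) else level

def calc_max_level (data : List Int) (filter_len : Option Int) : Int :=
  match filter_len with
  | none => aLoopNone (data.length + 1) data.length 1 0
  | some fl => aLoopSome (data.length + 1) (data.length : Int) fl 0

-- ===== PORT B =====
-- Python's int.bit_length = Nat.size (on the absolute value for negatives).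
def calc_max_level_alt (data : List Int) (filter_len : Option Int) : Int :=
  let n := data.length
  match filter_len with
  | none => if n ≤ 1 then 0 else ((n - 1).size : Int)
  | some fl =>
    if (n : Int) ≤ fl then 0
    else
      -- Python's `n >> k` with k = n.bit_length() - filter_len.bit_length(); the
      -- subtraction is nonnegative whenever the branch is reached with fl ≥ 0 (Pre_).
      let k : Nat := n.size - fl.natAbs.size
      if ((n >>> k : Nat) : Int) ≤ fl then (k : Int) else (k : Int) + 1

-- ===== PRECONDITION & SPEC =====
-- Pre_ excludes a negative filter_len: there A's halving loop never terminates
-- (len_ reaches 0 and stays 0 > filter_len), so A returns nothing to match.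
def Pre_calc_max_level (_data : List Int) (filter_len : Option Int) : Prop :=
  0 ≤ filter_len.getD 0
instance (data : List Int) (filter_len : Option Int) : Decidable (Pre_calc_max_level data filter_len) := by unfold Pre_calc_max_level; infer_instance

def pvWitness_calc_max_level : List Int × Option Int := ([3, 1, 4, 1, 5, 9, 2, 6], some 2)

def Spec_calc_max_level (data : List Int) (filter_len : Option Int) (out : Int) : Prop := out = calc_max_level_alt data filter_len
instance (data : List Int) (filter_len : Option Int) (out : Int) : Decidable (Spec_calc_max_level data filter_len out) := by unfold Spec_calc_max_level; infer_instance

-- ===== CLAIM (what is proved, stated in full; the proofs are below) =====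
def Claim_equal_calc_max_level : Prop := ∀ (data : List Int) (filter_len : Option Int), Dom_calc_max_level data filter_len → Pre_calc_max_level data filter_len → Spec_calc_max_level data filter_len (calc_max_level data filter_len)

-- ===== LEMMAS AND PROOFS =====

-- The value the `some` branch computes: smallest j with (n >>> j) ≤ f.
def hiJ (m f : Nat) : Nat :=
  if m ≤ f then 0 else hiJ (m / 2) f + 1
termination_by m
decreasing_by exact Nat.div_lt_self (by omega) (by omega)

theorem hiJ_le_iff (e : Nat) : ∀ (m f : Nat), hiJ m f ≤ e ↔ m >>> e ≤ f := by
  induction e with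
  | zero =>
    intro m f
    rw [hiJ]
    split <;> simp_all
  | succ e ih =>
    intro m f
    rw [hiJ]
    split
    · next h =>
      constructor
      · intro _
        calc m >>> (e + 1) ≤ m := Nat.shiftRight_le _ _
          _ ≤ f := h
      · omega
    · next h =>
      rw [Nat.succ_le_succ_iff, ih (m / 2) f]
      have : m >>> (e + 1) = (m / 2) >>> e := by
        rw [Nat.add_comm, Nat.shiftRight_add]
        rfl
      rw [this]

-- A's `some` loop equals hiJ once the fuel covers the number of iterations.
theorem aLoopSome_eq (fuel : Nat) : ∀ (m : Nat) (fl level : Int), 0 ≤ fl →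
    hiJ m fl.toNat ≤ fuel →
    aLoopSome fuel (m : Int) fl level = level + (hiJ m fl.toNat : Nat) := by
  induction fuel with
  | zero =>
    intro m fl level hfl hJ
    have h0 : hiJ m fl.toNat = 0 := Nat.le_zero.mp hJ
    simp [aLoopSome, h0]
  | succ fuel ih =>
    intro m fl level hfl hJ
    rw [aLoopSome]
    by_cases h : (m : Int) > fl
    · have hmf : fl.toNat < m := by omega
      have htd : (m : Int).tdiv 2 = ((m / 2 : Nat) : Int) := (Int.ofNat_tdiv m 2).symm
      have hJ1 : hiJ m fl.toNat = hiJ (m / 2) fl.toNat + 1 := by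
        rw [hiJ]; simp [Nat.not_le.mpr hmf]
      rw [if_pos h, htd, ih (m / 2) fl (level + 1) hfl (by omega)]
      rw [hJ1]; push_cast; ring
    · have hmf : m ≤ fl.toNat := by omega
      have h0 : hiJ m fl.toNat = 0 := by rw [hiJ]; simp [hmf]
      rw [if_neg h, h0]; simp

-- A's `none` loop: with sections = 2^j it returns level + (size (n-1) - j)
-- (size (n-1) = smallest e with n ≤ 2^e; clamped subtraction handles the stopped case).
theorem aLoopNone_eq (fuel : Nat) : ∀ (j n : Nat) (level : Int), n ≤ 2 ^ (j + fuel) →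
    aLoopNone fuel n (2 ^ j) level = level + ((Nat.size (n - 1) - j : Nat) : Int) := by
  induction fuel with
  | zero =>
    intro j n level hle
    rw [Nat.add_zero] at hle
    have hp : 0 < 2 ^ j := Nat.pow_pos (by omega)
    have : Nat.size (n - 1) ≤ j := Nat.size_le.mpr (by omega)
    have h0 : Nat.size (n - 1) - j = 0 := by omega
    have hnlt : ¬ 2 ^ j < n := by omega
    simp [aLoopNone, h0]
  | succ fuel ih =>
    intro j n level hle
    rw [aLoopNone]
    by_cases h : 2 ^ j < n
    · have h2 : 2 ^ j * 2 = 2 ^ (j + 1) := by ring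
      have hsz : j + 1 ≤ Nat.size (n - 1) :=
        Nat.lt_size.mpr (by omega)
      rw [if_pos h, h2, ih (j + 1) n (level + 1)
        (by rw [show j + 1 + fuel = j + (fuel + 1) from by omega]; exact hle)]
      have : Nat.size (n - 1) - j = (Nat.size (n - 1) - (j + 1)) + 1 := by omega
      rw [this]; push_cast; ring
    · have hp : 0 < 2 ^ j := Nat.pow_pos (by omega)
      have : Nat.size (n - 1) ≤ j := Nat.size_le.mpr (by omega)
      have h0 : Nat.size (n - 1) - j = 0 := by omega
      rw [if_neg h, h0]; simp

-- hiJ over the fuel bound: hiJ m f ≤ size m (shifting by size m yields 0).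
theorem hiJ_le_size (m f : Nat) : hiJ m f ≤ Nat.size m := by
  rw [hiJ_le_iff]
  have : m >>> Nat.size m = 0 := by
    rw [Nat.shiftRight_eq_div_pow]
    exact Nat.div_eq_of_lt (Nat.lt_size_self m)
  omega

-- B's closed form computes hiJ when m > f.
theorem hiJ_closed (m f : Nat) (hmf : f < m) :
    hiJ m f = (if m >>> (Nat.size m - Nat.size f) ≤ f
               then Nat.size m - Nat.size f else Nat.size m - Nat.size f + 1) := by
  have hsz : Nat.size f ≤ Nat.size m := Nat.size_le_size (by omega)
  set k := Nat.size m - Nat.size f with hk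
  have hm0 : 0 < m := by omega
  have hmlo : 2 ^ (Nat.size m - 1) ≤ m := Nat.lt_size.mp (by
    have := Nat.size_pos.mpr hm0; omega)
  have hfhi : f < 2 ^ Nat.size f := Nat.lt_size_self f
  split
  · next h =>
    -- J ≤ k, and (for k ≥ 1) m >>> (k-1) > f, so J = k
    refine Nat.le_antisymm ((hiJ_le_iff k m f).mpr h) ?_
    rcases Nat.eq_zero_or_pos k with hk0 | hkpos
    · omega
    · by_contra hlt
      have hJle : hiJ m f ≤ k - 1 := by omega
      have hsh : m >>> (k - 1) ≤ f := (hiJ_le_iff (k - 1) m f).mp hJle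
      rw [Nat.shiftRight_eq_div_pow] at hsh
      have hge : 2 ^ (k - 1) * (f + 1) ≤ m := by
        calc 2 ^ (k - 1) * (f + 1) ≤ 2 ^ (k - 1) * 2 ^ Nat.size f :=
              Nat.mul_le_mul_left _ hfhi
          _ = 2 ^ (k - 1 + Nat.size f) := by rw [Nat.pow_add]
          _ = 2 ^ (Nat.size m - 1) := by congr 1; omega
          _ ≤ m := hmlo
      have hge' : (f + 1) * 2 ^ (k - 1) ≤ m := by rw [Nat.mul_comm]; exact hge
      have := (Nat.le_div_iff_mul_le (Nat.two_pow_pos (k - 1))).mpr hge'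
      omega
  · next h =>
    -- here f > 0 (f = 0 would force the then-branch), and m >>> (k+1) ≤ f
    have hf0 : 0 < f := by
      by_contra hf
      have hf' : f = 0 := by omega
      apply h
      have : k = Nat.size m := by simp [hk, hf', Nat.size_zero]
      rw [this, Nat.shiftRight_eq_div_pow, Nat.div_eq_of_lt (Nat.lt_size_self m)]
      omega
    have hflo : 2 ^ (Nat.size f - 1) ≤ f := Nat.lt_size.mp (by
      have := Nat.size_pos.mpr hf0; omega)
    have hfsz : 0 < Nat.size f := Nat.size_pos.mpr hf0
    have hsh1 : m >>> (k + 1) ≤ f := by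
      rw [Nat.shiftRight_eq_div_pow]
      have hmhi : m < 2 ^ (k + 1) * 2 ^ (Nat.size f - 1) := by
        calc m < 2 ^ Nat.size m := Nat.lt_size_self m
          _ = 2 ^ (k + 1 + (Nat.size f - 1)) := by congr 1; omega
          _ = 2 ^ (k + 1) * 2 ^ (Nat.size f - 1) := by rw [Nat.pow_add]
      have hmhi' : m < 2 ^ (Nat.size f - 1) * 2 ^ (k + 1) := by rw [Nat.mul_comm]; exact hmhi
      have := (Nat.div_lt_iff_lt_mul (Nat.two_pow_pos (k + 1))).mpr hmhi'
      omega
    have hle : hiJ m f ≤ k + 1 := (hiJ_le_iff (k + 1) m f).mpr hsh1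
    have hgt : ¬ hiJ m f ≤ k := fun hc => h ((hiJ_le_iff k m f).mp hc)
    omega

-- ===== VERDICT (by name: the statement is the Claim_ definition above) =====
theorem calc_max_level_spec : Claim_equal_calc_max_level := by
  intro data filter_len _hdom hpre
  unfold Spec_calc_max_level calc_max_level calc_max_level_alt
  match filter_len with
  | none =>
    simp only
    have hpow : data.length ≤ 2 ^ (0 + (data.length + 1)) := by
      have h1 : data.length < 2 ^ data.length := Nat.lt_two_pow_self
      have h2 : 2 ^ data.length ≤ 2 ^ (0 + (data.length + 1)) :=
        Nat.pow_le_pow_right (by omega) (by omega)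
      omega
    have hrun := aLoopNone_eq (data.length + 1) 0 data.length 0 hpow
    rw [pow_zero] at hrun
    rw [hrun]
    rcases Nat.lt_or_ge data.length 2 with hle | hgt
    · have hle1 : data.length ≤ 1 := by omega
      have : Nat.size (data.length - 1) = 0 := by
        have : data.length - 1 = 0 := by omega
        simp [this, Nat.size_zero]
      simp [hle1]
    · have hgt1 : ¬ data.length ≤ 1 := by omega
      simp [hgt1]
  | some fl =>
    have hfl : 0 ≤ fl := hpre
    simp only
    rw [aLoopSome_eq (data.length + 1) data.length fl 0 hfl
      (le_trans (hiJ_le_size _ _) (by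
        have : Nat.size data.length ≤ data.length := Nat.size_le.mpr Nat.lt_two_pow_self
        omega))]
    by_cases hnf : (data.length : Int) ≤ fl
    · have : data.length ≤ fl.toNat := by omega
      rw [if_pos hnf]
      have h0 : hiJ data.length fl.toNat = 0 := by rw [hiJ]; simp [this]
      simp [h0]
    · have hmf : fl.toNat < data.length := by omega
      have hnatAbs : fl.natAbs = fl.toNat := by omega
      rw [if_neg hnf, hnatAbs, hiJ_closed data.length fl.toNat hmf]
      have hcast : ∀ k : Nat, (((data.length >>> k : Nat) : Int) ≤ fl ↔ data.length >>> k ≤ fl.toNat) := by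
        intro k; omega
      by_cases hb : data.length >>> (Nat.size data.length - Nat.size fl.toNat) ≤ fl.toNat
      · rw [if_pos hb, if_pos ((hcast _).mpr hb)]; simp
      · rw [if_neg hb, if_neg (fun hc => hb ((hcast _).mp hc))]
        push_cast; ring
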